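-- pv_equiv track=rewrite | github.com/HennyH/animeu | animeu/common/iter_helpers.py | lookaround
-- ===== SOURCE A (Python) =====
-- def lookaround(iterable):
--     """Iterate over iterable yielding the value and if it is a border value."""
--     iterable_wrapper = iter(iterable)
--
--     # At least return a single value, even if it is None
--     try:
--         result = next(iterable_wrapper)
--     except StopIteration:
--         return
--
--     first = True
--     last = False
--
--     for value in iterable_wrapper:
--         yield result, first, last
--         first = False
--         result = value
--
--     last = True
--     yield result, first, last
-- ===== SOURCE B (Python) =====
-- def lookaround(iterable):
--     """Iterate over iterable yielding the value and if it is a border value."""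
--     items = list(iterable)
--     if not items:
--         return
--     n = len(items)
--     for i, value in enumerate(items):
--         yield value, i == 0, i == n - 1
-- ===== Notes on version B (the rewrite author's own statement) =====
-- stated objective: simpler
-- what changed: B materialises the iterable and derives the first/last flags from enumerate index vs length, removing A's one-element lag buffer and try/next bootstrap.
import Mathlib
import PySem

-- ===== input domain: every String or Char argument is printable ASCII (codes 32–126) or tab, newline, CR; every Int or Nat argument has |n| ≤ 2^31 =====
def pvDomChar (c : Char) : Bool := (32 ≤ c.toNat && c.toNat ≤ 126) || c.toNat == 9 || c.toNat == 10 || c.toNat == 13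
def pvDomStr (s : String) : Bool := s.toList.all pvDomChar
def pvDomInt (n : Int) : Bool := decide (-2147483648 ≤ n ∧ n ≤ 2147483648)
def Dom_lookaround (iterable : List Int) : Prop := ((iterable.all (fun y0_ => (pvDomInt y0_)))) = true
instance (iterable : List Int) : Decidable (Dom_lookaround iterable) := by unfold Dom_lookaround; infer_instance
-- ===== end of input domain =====

-- B replaces A's lag-buffer/next-bootstrap generator by an enumerate loop deciding flags
-- from index vs length (simpler decomposition; equal for finite inputs, not lazy like A).
-- ===== PORT A =====
-- generator ported as the list of yielded tuples: lag buffer `result`, flag `first`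
def lookaroundLoop (result : Int) (first : Bool) (rest : List Int) : List (Int × Bool × Bool) :=
  match rest with
  | [] => [(result, first, true)]
  | value :: vs => (result, first, false) :: lookaroundLoop value false vs

def lookaround (iterable : List Int) : List (Int × Bool × Bool) :=
  match iterable with
  | [] => []
  | result :: rest => lookaroundLoop result true rest

-- ===== PORT B =====
-- B: flags from enumerate index vs length
def lookaround_alt (iterable : List Int) : List (Int × Bool × Bool) :=
  if iterable = [] then []
  else
    let n : Int := iterable.length
    (PySem.List.enumerate iterable).map (fun p => (p.2, decide (p.1 = 0), decide (p.1 = n - 1)))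

-- ===== PRECONDITION & SPEC =====
def Spec_lookaround (iterable : List Int) (out : List (Int × Bool × Bool)) : Prop := out = lookaround_alt iterable
instance (iterable : List Int) (out : List (Int × Bool × Bool)) : Decidable (Spec_lookaround iterable out) := by unfold Spec_lookaround; infer_instance

-- ===== CLAIM (what is proved, stated in full; the proofs are below) =====
def Claim_equal_lookaround : Prop := ∀ (iterable : List Int), Dom_lookaround iterable → Spec_lookaround iterable (lookaround iterable)

-- ===== LEMMAS AND PROOFS =====

-- ===== VERDICT (by name: the statement is the Claim_ definition above) =====
lemma loop_eq (result : Int) (rest : List Int) (s n : Int) (hs : 0 ≤ s)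
    (hn : n = s + 1 + rest.length) (first : Bool) (hf : first = decide (s = 0)) :
    lookaroundLoop result first rest =
      ((s, result) :: PySem.List.enumerate rest (s + 1)).map
        (fun p => (p.2, decide (p.1 = 0), decide (p.1 = n - 1))) := by
  induction rest generalizing result s first with
  | nil =>
    simp only [List.length_nil, Nat.cast_zero, add_zero] at hn
    simp [lookaroundLoop, PySem.List.enumerate, hf]
    omega
  | cons v vs ih =>
    rw [lookaroundLoop, PySem.List.enumerate_cons]
    have h1 : ¬ (s = n - 1) := by simp only [List.length_cons] at hn; push_cast at hn; omega
    simp only [List.map_cons, hf]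
    rw [ih v (s + 1) (by omega)
        (by simp only [List.length_cons] at hn; push_cast at hn ⊢; omega) false (by simp; omega)]
    simp [h1]

theorem lookaround_spec : Claim_equal_lookaround := by
  intro iterable _
  unfold Spec_lookaround lookaround lookaround_alt
  match iterable with
  | [] => rfl
  | r :: rest =>
    simp only [reduceCtorEq, if_false]
    rw [PySem.List.enumerate_cons]
    exact loop_eq r rest 0 _ le_rfl (by simp [List.length_cons]; ring) true (by simp)
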